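-- pv_equiv track=rewrite | github.com/ess-dg/dg_MultiBlade_MBUTY | MBUTYcap/lib/libConfigGenerator.py | _generateCassette2ElectronicsConfigMIRACLES
-- ===== SOURCE A (Python) =====
-- def _generateCassette2ElectronicsConfigMIRACLES(num_cassettes):
--     cassette_config = []
--     ring    = 0
--     tube    = 0
--     for i in range(num_cassettes):
--         cassette_config.append({
--             "ID": i,
--             "Ring": ring,
--             "Fen": 0,
--             "Tube": tube,
--         })
--         tube += 1
--         if i >= 11 :
--             ring = 1
--         if  i == 11 :
--             tube = 0
--
--     return cassette_config
-- ===== SOURCE B (Python) =====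
-- def _generateCassette2ElectronicsConfigMIRACLES(num_cassettes):
--     # closed form: ring is 0 for i<12 and 1 after; tube counts up and restarts at i=12
--     return [
--         {"ID": i,
--          "Ring": 0 if i < 12 else 1,
--          "Fen": 0,
--          "Tube": i if i < 12 else i - 12}
--         for i in range(num_cassettes)
--     ]
-- ===== Notes on version B (the rewrite author's own statement) =====
-- stated objective: simpler
-- what changed: Replaces the stateful loop carrying running ring/tube accumulators with a stateless list comprehension computing each field by a closed-form formula of i.
import Mathlib
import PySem

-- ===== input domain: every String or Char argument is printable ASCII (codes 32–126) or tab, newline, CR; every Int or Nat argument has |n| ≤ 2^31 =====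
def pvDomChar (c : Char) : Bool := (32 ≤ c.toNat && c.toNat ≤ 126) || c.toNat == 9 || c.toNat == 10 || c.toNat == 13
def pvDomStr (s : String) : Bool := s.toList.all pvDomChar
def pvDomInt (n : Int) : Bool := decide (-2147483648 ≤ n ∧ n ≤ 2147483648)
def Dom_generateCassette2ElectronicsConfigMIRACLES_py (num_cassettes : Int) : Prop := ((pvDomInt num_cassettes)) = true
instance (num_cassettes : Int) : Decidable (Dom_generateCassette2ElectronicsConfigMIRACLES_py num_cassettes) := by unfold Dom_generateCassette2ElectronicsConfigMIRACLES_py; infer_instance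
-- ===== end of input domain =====

-- B replaces A's loop with its running ring/tube state by a stateless comprehension
-- computing each field from i in closed form (objective: simpler).

-- ===== PORT A =====
-- the loop body: state (ring, tube, acc); append the dict, then update tube/ring
def pvStepA (st : Int × Int × List (List (String × Int))) (i : Int) :
    Int × Int × List (List (String × Int)) :=
  let ring := st.1
  let tube := st.2.1
  let acc := st.2.2
  let acc := acc ++ [[("ID", i), ("Ring", ring), ("Fen", (0 : Int)), ("Tube", tube)]]
  let tube := tube + 1
  let ring := if i ≥ 11 then 1 else ring
  let tube := if i = 11 then 0 else tube
  (ring, tube, acc)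

def generateCassette2ElectronicsConfigMIRACLES_py (num_cassettes : Int) : List (List (String × Int)) :=
  ((PySem.List.pyRange 0 num_cassettes 1).foldl pvStepA (0, 0, [])).2.2

-- ===== PORT B =====
def generateCassette2ElectronicsConfigMIRACLES_py_alt (num_cassettes : Int) : List (List (String × Int)) :=
  (PySem.List.pyRange 0 num_cassettes 1).map (fun i =>
    [("ID", i), ("Ring", if i < 12 then 0 else 1), ("Fen", (0 : Int)),
     ("Tube", if i < 12 then i else i - 12)])

-- ===== PRECONDITION & SPEC =====
def Spec_generateCassette2ElectronicsConfigMIRACLES_py (num_cassettes : Int) (out : List (List (String × Int))) : Prop := out = generateCassette2ElectronicsConfigMIRACLES_py_alt num_cassettes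
instance (num_cassettes : Int) (out : List (List (String × Int))) : Decidable (Spec_generateCassette2ElectronicsConfigMIRACLES_py num_cassettes out) := by unfold Spec_generateCassette2ElectronicsConfigMIRACLES_py; infer_instance

-- ===== CLAIM (what is proved, stated in full; the proofs are below) =====
def Claim_equal_generateCassette2ElectronicsConfigMIRACLES_py : Prop := ∀ (num_cassettes : Int), Dom_generateCassette2ElectronicsConfigMIRACLES_py num_cassettes → Spec_generateCassette2ElectronicsConfigMIRACLES_py num_cassettes (generateCassette2ElectronicsConfigMIRACLES_py num_cassettes)

-- ===== LEMMAS AND PROOFS =====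

-- A's loop state after processing range(n): ring/tube in closed form, acc = B's rows
theorem pvFoldA_closed (n : Nat) :
    (PySem.List.pyRange 0 (n : Int) 1).foldl pvStepA (0, 0, []) =
      ((if (n : Int) < 12 then 0 else 1),
       (if (n : Int) < 12 then (n : Int) else (n : Int) - 12),
       (PySem.List.pyRange 0 (n : Int) 1).map (fun i =>
         [("ID", i), ("Ring", if i < 12 then 0 else 1), ("Fen", (0 : Int)),
          ("Tube", if i < 12 then i else i - 12)])) := by
  induction n with
  | zero => simp [PySem.List.pyRange_one_eq_nil]
  | succ m ih =>
    have hcast : ((m + 1 : Nat) : Int) = (m : Int) + 1 := by push_cast; ring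
    rw [hcast, PySem.List.pyRange_one_succ_right (show (0:Int) ≤ (m:Int) by omega)]
    rw [List.foldl_append, List.map_append, ih]
    simp only [List.foldl_cons, List.foldl_nil, pvStepA]
    by_cases h12 : (m : Int) < 11
    · simp [show ¬ ((m:Int) ≥ 11) from by omega, show (m:Int) ≠ 11 from by omega,
        show (m:Int) < 12 from by omega, show (m:Int) + 1 < 12 from by omega]
    · by_cases heq : (m : Int) = 11
      · simp [heq]
      · simp [show (m:Int) ≥ 11 from by omega, show (m:Int) ≠ 11 from heq,
          show ¬ (m:Int) < 12 from by omega, show ¬ ((m:Int) + 1 < 12) from by omega]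
        omega

-- ===== VERDICT (by name: the statement is the Claim_ definition above) =====
theorem generateCassette2ElectronicsConfigMIRACLES_py_spec : Claim_equal_generateCassette2ElectronicsConfigMIRACLES_py := by
  intro n _
  unfold Spec_generateCassette2ElectronicsConfigMIRACLES_py
  unfold generateCassette2ElectronicsConfigMIRACLES_py generateCassette2ElectronicsConfigMIRACLES_py_alt
  by_cases hn : 0 ≤ n
  · obtain ⟨m, rfl⟩ := Int.eq_ofNat_of_zero_le hn
    rw [pvFoldA_closed]
  · rw [PySem.List.pyRange_one_eq_nil (by omega)]
    simp
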